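-- pv_equiv track=rewrite | github.com/khui/CwdocServer | src/main/resources/python/pairdata4cf.py | createTestDoc
-- ===== SOURCE A (Python) =====
-- def createTestDoc(ldocs, alldocs2consider, testnum):
--     labledocs = dict(ldocs)
--     testdocs=list()
--     grads = list(labledocs.keys())
--     labelidx=dict(zip(grads, [0]*len(grads)))
--     i=len(grads)-1
--     while len(testdocs) < testnum:
--         l = grads[i % len(grads)]
--         i+=1
--         currentidx = labelidx[l]
--         for j in range(currentidx, len(labledocs[l])):
--             doc2consider = labledocs[l][j]
--             if doc2consider in alldocs2consider:
--                 testdocs.append(doc2consider)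
--                 labelidx[l]=j+1
--                 break
--     return testdocs
-- ===== SOURCE B (Python) =====
-- def createTestDoc(ldocs, alldocs2consider, testnum):
--     labeled = dict(ldocs)
--     consider = set(alldocs2consider)
--     grads = list(labeled)
--     order = grads[-1:] + grads[:-1]
--     queue = [([d for d in labeled[g] if d in consider], 0) for g in order]
--     out = []
--     head = 0
--     while head < len(queue) and len(out) < testnum:
--         lst, i = queue[head]
--         head += 1
--         if i < len(lst):
--             out.append(lst[i])
--             queue.append((lst, i + 1))
--     return out
-- ===== Notes on version B (the rewrite author's own statement) =====
-- stated objective: alternative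
-- what changed: B replaces A's rescan-based round robin (a dict of per-grade cursor indices plus an inner scan that re-tests membership against the alldocs2consider list) with per-grade document lists filtered once through a set and then consumed by a rotating queue of (list, index) entries that drops exhausted grades; it trades A's lazy early-exit scanning for one up-front filtering pass.
import Mathlib
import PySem

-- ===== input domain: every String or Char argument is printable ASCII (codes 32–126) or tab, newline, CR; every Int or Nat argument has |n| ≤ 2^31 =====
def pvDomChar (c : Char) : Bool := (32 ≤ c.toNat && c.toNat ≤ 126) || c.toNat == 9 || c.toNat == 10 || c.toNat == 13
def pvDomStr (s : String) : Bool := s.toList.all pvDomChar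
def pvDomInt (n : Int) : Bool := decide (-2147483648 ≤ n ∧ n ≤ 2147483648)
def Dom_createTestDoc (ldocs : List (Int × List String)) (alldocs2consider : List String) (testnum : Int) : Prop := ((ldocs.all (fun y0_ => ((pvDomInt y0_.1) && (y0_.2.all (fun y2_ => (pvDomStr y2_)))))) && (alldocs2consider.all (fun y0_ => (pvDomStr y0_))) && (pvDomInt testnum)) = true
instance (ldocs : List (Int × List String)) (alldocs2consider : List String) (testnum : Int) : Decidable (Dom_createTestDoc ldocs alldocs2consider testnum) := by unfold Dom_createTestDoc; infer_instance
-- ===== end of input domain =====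

-- B replaces A's counter-and-rescan round robin (dict of per-grade indices, inner scan with a
-- list membership test) by per-grade lists filtered once through a set and consumed by a rotating
-- queue that discards exhausted grades; objective: alternative (different algorithm, similar cost).

-- ===== PORT A =====
-- inner 'for j in range(currentidx, len(...)): ... break' loop of A, as structural recursion on j
def scanA (alldocs docs : List String) (j : Int) : Option (Int × String) :=
  if h : j < (docs.length : Int) then
    match PySem.List.pyGet? docs j with
    | none => none            -- unreachable: 0 ≤ j < len on every reachable call
    | some d =>
      if alldocs.contains d then some (j, d) else scanA alldocs docs (j + 1)
  else none
termination_by ((docs.length : Int) - j).toNat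
decreasing_by omega

-- the 'while len(testdocs) < testnum' loop of A; fuel only makes the recursion total — under
-- Pre_ the fuel chosen in createTestDoc is proved sufficient
def aLoop (labeled : PySem.Dict Int (List String)) (alldocs : List String) (grads : List Int)
    (testnum : Int) : Nat → Int → PySem.Dict Int Int → List String → List String
  | 0, _, _, acc => acc
  | fuel + 1, i, lidx, acc =>
    if (acc.length : Int) < testnum then
      match PySem.Int.mod? i (grads.length : Int) with
      | none => acc           -- ZeroDivisionError 'i % len(grads)' with no grades: outside Pre_
      | some r =>
        let l := PySem.List.pyGetD grads r 0          -- grads[i % len(grads)], r in range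
        let docs := (labeled.get? l).getD []          -- labledocs[l]; l is always a key
        let cur := lidx.getD l 0                      -- labelidx[l]; l is always a key
        match scanA alldocs docs cur with
        | none => aLoop labeled alldocs grads testnum fuel (i + 1) lidx acc
        | some (j, d) =>
            aLoop labeled alldocs grads testnum fuel (i + 1) (lidx.insert l (j + 1)) (acc ++ [d])
    else acc

def createTestDoc (ldocs : List (Int × List String)) (alldocs2consider : List String) (testnum : Int) : List String :=
  let labeled := PySem.Dict.ofList ldocs
  let grads := labeled.keys
  let lidx := PySem.Dict.ofList (grads.map (fun g => (g, (0 : Int))))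
  aLoop labeled alldocs2consider grads testnum
    (testnum.toNat * grads.length + grads.length + 1) ((grads.length : Int) - 1) lidx []

-- ===== PORT B =====
-- 'while head < len(queue) and len(out) < testnum: lst, i = queue[head]; head += 1; ...'
-- (the head pointer into the ever-growing Python list is the front of the remaining queue here)
def bLoop (testnum : Int) (out : List String) (queue : List (List String × Int)) : List String :=
  match queue with
  | [] => out
  | (lst, i) :: rest =>
    if (out.length : Int) < testnum then
      if i < (lst.length : Int) then
        -- lst[i]; i is 0 or a previous i+1, so always 0 ≤ i < len(lst) here
        bLoop testnum (out ++ [PySem.List.pyGetD lst i ""]) (rest ++ [(lst, i + 1)])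
      else
        bLoop testnum out rest
    else out
termination_by (queue.map (fun p => ((p.1.length : Int) - p.2).toNat + 1)).sum
decreasing_by all_goals simp [List.map_append] <;> omega

def createTestDoc_alt (ldocs : List (Int × List String)) (alldocs2consider : List String) (testnum : Int) : List String :=
  let labeled := PySem.Dict.ofList ldocs
  let consider := PySem.Set.ofList alldocs2consider
  let grads := labeled.keys
  let order := PySem.List.slice grads (some (-1)) none ++ PySem.List.slice grads none (some (-1))
  let queue := order.map (fun g =>
    (((labeled.get? g).getD []).filter (fun d => PySem.Set.contains consider d), (0 : Int)))
  bLoop testnum [] queue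

-- ===== PRECONDITION & SPEC =====
-- Pre_ excludes exactly the inputs on which Python A does not return: testnum > 0 with no
-- graded documents at all (ZeroDivisionError on 'i % len(grads)') and testnum larger than the
-- number of graded document slots present in alldocs2consider (the while loop never ends).
def Pre_createTestDoc (ldocs : List (Int × List String)) (alldocs2consider : List String) (testnum : Int) : Prop :=
  testnum ≤ 0 ∨
    ((PySem.Dict.ofList ldocs).keys ≠ [] ∧
      testnum ≤ (((PySem.Dict.ofList ldocs).keys.map (fun g =>
        ((((PySem.Dict.ofList ldocs).get? g).getD []).filter
          (fun d => alldocs2consider.contains d)).length)).sum : Int))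
instance (ldocs : List (Int × List String)) (alldocs2consider : List String) (testnum : Int) : Decidable (Pre_createTestDoc ldocs alldocs2consider testnum) := by unfold Pre_createTestDoc; infer_instance

def pvWitness_createTestDoc : (List (Int × List String)) × List String × Int :=
  ([(1, ["a", "b"]), (2, ["c"])], ["a", "c"], 2)

def Spec_createTestDoc (ldocs : List (Int × List String)) (alldocs2consider : List String) (testnum : Int) (out : List String) : Prop := out = createTestDoc_alt ldocs alldocs2consider testnum
instance (ldocs : List (Int × List String)) (alldocs2consider : List String) (testnum : Int) (out : List String) : Decidable (Spec_createTestDoc ldocs alldocs2consider testnum out) := by unfold Spec_createTestDoc; infer_instance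

-- ===== CLAIM (what is proved, stated in full; the proofs are below) =====
def Claim_equal_createTestDoc : Prop := ∀ (ldocs : List (Int × List String)) (alldocs2consider : List String) (testnum : Int), Dom_createTestDoc ldocs alldocs2consider testnum → Pre_createTestDoc ldocs alldocs2consider testnum → Spec_createTestDoc ldocs alldocs2consider testnum (createTestDoc ldocs alldocs2consider testnum)

-- ===== LEMMAS AND PROOFS =====

-- proof-side abstraction of bLoop: the queue of per-grade remainders, as plain lists
def mLoop (testnum : Int) (out : List String) (queue : List (List String)) : List String :=
  match queue with
  | [] => out
  | col :: rest =>
    if (out.length : Int) < testnum then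
      match col with
      | [] => mLoop testnum out rest
      | x :: xs => mLoop testnum (out ++ [x]) (rest ++ [xs])
    else out
termination_by (queue.map (fun l => l.length + 1)).sum
decreasing_by all_goals simp [List.map_append] <;> omega

-- the filtered remainder of grade g's document list, at the positions A has not yet consumed
def remOf (alldocs : List String) (labeled : PySem.Dict Int (List String))
    (lidx : PySem.Dict Int Int) (g : Int) : List String :=
  (((labeled.get? g).getD []).drop (lidx.getD g 0).toNat).filter (fun d => alldocs.contains d)

-- B's queue as seen from A's loop state: grades rotated so that the one A visits next is first
def qOf (alldocs : List String) (labeled : PySem.Dict Int (List String)) (grads : List Int)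
    (lidx : PySem.Dict Int Int) (r : Nat) : List (List String) :=
  (grads.drop r ++ grads.take r).map (remOf alldocs labeled lidx)

def sumLens (q : List (List String)) : Nat := (q.map List.length).sum

theorem mLoop_of_ge (t : Int) (out : List String) (q : List (List String))
    (h : ¬ ((out.length : Int) < t)) : mLoop t out q = out := by
  cases q with
  | nil => rw [mLoop.eq_def]
  | cons c rest => rw [mLoop.eq_def]; simp [h]

theorem aLoop_of_ge (labeled : PySem.Dict Int (List String)) (alldocs : List String)
    (grads : List Int) (testnum : Int) (fuel : Nat) (i : Int) (lidx : PySem.Dict Int Int)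
    (acc : List String) (h : ¬ ((acc.length : Int) < testnum)) :
    aLoop labeled alldocs grads testnum fuel i lidx acc = acc := by
  cases fuel with
  | zero => rfl
  | succ f => rw [aLoop]; simp [h]

theorem mLoop_nil_head (t : Int) (q₂ : List (List String)) (out : List String) :
    mLoop t out ([] :: q₂) = mLoop t out q₂ := by
  rw [mLoop.eq_def]
  by_cases hlt : (out.length : Int) < t
  · simp [hlt]
  · simp only [if_neg hlt]
    exact (mLoop_of_ge t out q₂ hlt).symm

theorem mLoop_mid_nil (t : Int) : ∀ (n : Nat) (q₁ q₂ : List (List String)) (out : List String),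
    ((q₁ ++ q₂).map (fun l => l.length + 1)).sum ≤ n →
    mLoop t out (q₁ ++ [] :: q₂) = mLoop t out (q₁ ++ q₂) := by
  intro n
  induction n with
  | zero =>
    intro q₁ q₂ out h
    cases q₁ with
    | nil => simpa using mLoop_nil_head t q₂ out
    | cons c r => simp at h
  | succ n ih =>
    intro q₁ q₂ out h
    cases q₁ with
    | nil => simpa using mLoop_nil_head t q₂ out
    | cons c r =>
      by_cases hlt : (out.length : Int) < t
      · cases c with
        | nil =>
          have l1 : mLoop t out (([] : List String) :: (r ++ [] :: q₂))
              = mLoop t out (r ++ [] :: q₂) := mLoop_nil_head _ _ _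
          have l2 : mLoop t out (([] : List String) :: (r ++ q₂))
              = mLoop t out (r ++ q₂) := mLoop_nil_head _ _ _
          simp only [List.cons_append, l1, l2]
          exact ih r q₂ out (by simp at h ⊢; omega)
        | cons x xs =>
          have l1 : mLoop t out ((x :: xs) :: (r ++ [] :: q₂))
              = mLoop t (out ++ [x]) ((r ++ [] :: q₂) ++ [xs]) := by
            rw [mLoop.eq_def]; simp [hlt]
          have l2 : mLoop t out ((x :: xs) :: (r ++ q₂))
              = mLoop t (out ++ [x]) ((r ++ q₂) ++ [xs]) := by
            rw [mLoop.eq_def]; simp [hlt]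
          simp only [List.cons_append, l1, l2]
          have e1 : (r ++ [] :: q₂) ++ [xs] = r ++ [] :: (q₂ ++ [xs]) := by simp
          have e2 : (r ++ q₂) ++ [xs] = r ++ (q₂ ++ [xs]) := by simp
          rw [e1, e2]
          exact ih r (q₂ ++ [xs]) (out ++ [x]) (by simp at h ⊢; omega)
      · rw [mLoop_of_ge _ _ _ hlt, mLoop_of_ge _ _ _ hlt]

theorem bLoopP_of_ge (t : Int) (out : List String) (q : List (List String × Int))
    (h : ¬ ((out.length : Int) < t)) : bLoop t out q = out := by
  cases q with
  | nil => rw [bLoop.eq_def]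
  | cons p rest =>
    obtain ⟨lst, i⟩ := p
    rw [bLoop.eq_def]
    simp [h]

theorem bLoop_abs (t : Int) : ∀ (n : Nat) (q : List (List String × Int)) (out : List String),
    (∀ p ∈ q, 0 ≤ p.2) →
    (q.map (fun p => ((p.1.length : Int) - p.2).toNat + 1)).sum ≤ n →
    bLoop t out q = mLoop t out (q.map (fun p => p.1.drop p.2.toNat)) := by
  intro n
  induction n with
  | zero =>
    intro q out _ hb
    cases q with
    | nil => rw [bLoop.eq_def, mLoop.eq_def]; rfl
    | cons p rest => simp at hb
  | succ n ih =>
    intro q out hinv hb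
    cases q with
    | nil => rw [bLoop.eq_def, mLoop.eq_def]; rfl
    | cons p rest =>
      obtain ⟨lst, i⟩ := p
      have hi : 0 ≤ i := hinv (lst, i) List.mem_cons_self
      by_cases hlt : (out.length : Int) < t
      · by_cases hil : i < (lst.length : Int)
        · have hitn : i.toNat < lst.length := by omega
          have hx : PySem.List.pyGetD lst i "" = lst[i.toNat] :=
            PySem.List.pyGetD_eq_getElem lst "" hi hil
          have hL : bLoop t out ((lst, i) :: rest)
              = bLoop t (out ++ [lst[i.toNat]]) (rest ++ [(lst, i + 1)]) := by
            rw [bLoop.eq_def]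
            simp [hlt, hil, hx]
          have hdrop : lst.drop i.toNat = lst[i.toNat] :: lst.drop (i.toNat + 1) :=
            List.drop_eq_getElem_cons hitn
          have hR : mLoop t out (((lst, i) :: rest).map (fun p => p.1.drop p.2.toNat))
              = mLoop t (out ++ [lst[i.toNat]])
                  ((rest.map (fun p => p.1.drop p.2.toNat)) ++ [lst.drop (i.toNat + 1)]) := by
            rw [List.map_cons]
            show mLoop t out ((lst.drop i.toNat) :: _) = _
            rw [hdrop, mLoop.eq_def]
            simp [hlt]
          rw [hL, hR]
          have hmap : (rest ++ [(lst, i + 1)]).map (fun p => p.1.drop p.2.toNat)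
              = (rest.map (fun p => p.1.drop p.2.toNat)) ++ [lst.drop (i.toNat + 1)] := by
            rw [List.map_append]
            simp only [List.map_cons, List.map_nil]
            have : (i + 1).toNat = i.toNat + 1 := by omega
            rw [this]
          rw [← hmap]
          apply ih
          · intro p hp
            rcases List.mem_append.1 hp with h1 | h2
            · exact hinv p (List.mem_cons_of_mem _ h1)
            · have hp2 : p.2 = i + 1 := by
                have he : p = (lst, i + 1) := by simpa using h2
                rw [he]
              omega
          · simp only [List.map_append, List.sum_append, List.map_cons, List.map_nil] at hb ⊢
            simp only [List.sum_cons, List.sum_nil] at hb ⊢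
            omega
        · have hdrop : lst.drop i.toNat = [] := List.drop_eq_nil_of_le (by omega)
          have hL : bLoop t out ((lst, i) :: rest) = bLoop t out rest := by
            rw [bLoop.eq_def]
            simp [hlt, hil]
          rw [hL, List.map_cons, hdrop, mLoop_nil_head]
          apply ih
          · intro p hp; exact hinv p (List.mem_cons_of_mem _ hp)
          · simp only [List.map_cons, List.sum_cons] at hb
            omega
      · rw [mLoop_of_ge t out _ hlt]
        rw [bLoop.eq_def]
        simp [hlt]

theorem scanA_none (alldocs docs : List String) (start : Int) (h0 : 0 ≤ start)
    (h : (docs.drop start.toNat).filter (fun d => alldocs.contains d) = []) :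
    scanA alldocs docs start = none := by
  have main : ∀ (n : Nat) (start : Int), 0 ≤ start → docs.length ≤ start.toNat + n →
      (docs.drop start.toNat).filter (fun d => alldocs.contains d) = [] →
      scanA alldocs docs start = none := by
    intro n
    induction n with
    | zero =>
      intro s h0 hn h
      rw [scanA.eq_def]
      have : ¬ (s < (docs.length : Int)) := by omega
      simp [this]
    | succ n ih =>
      intro s h0 hn h
      rw [scanA.eq_def]
      by_cases hlt : s < (docs.length : Int)
      · have hsn : s.toNat < docs.length := by omega
        rw [List.drop_eq_getElem_cons hsn, List.filter_cons] at h
        cases hc : alldocs.contains docs[s.toNat] with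
        | true => rw [hc] at h; simp at h
        | false =>
          rw [hc] at h
          simp only [hlt, dif_pos, PySem.List.pyGet?_eq_some_getElem docs h0 hlt, hc,
            Bool.false_eq_true, if_false]
          exact ih (s + 1) (by omega) (by omega) (by have : (s + 1).toNat = s.toNat + 1 := by omega
                                                     rw [this]; simpa using h)
      · simp [hlt]
  exact main (docs.length - start.toNat + 1) start h0 (by omega) h

theorem scanA_some (alldocs docs : List String) (start : Int) (x : String) (xs : List String)
    (h0 : 0 ≤ start)
    (h : (docs.drop start.toNat).filter (fun d => alldocs.contains d) = x :: xs) :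
    ∃ j : Int, scanA alldocs docs start = some (j, x) ∧ 0 ≤ j ∧
      (docs.drop (j + 1).toNat).filter (fun d => alldocs.contains d) = xs := by
  have main : ∀ (n : Nat) (start : Int), 0 ≤ start → docs.length ≤ start.toNat + n →
      (docs.drop start.toNat).filter (fun d => alldocs.contains d) = x :: xs →
      ∃ j : Int, scanA alldocs docs start = some (j, x) ∧ 0 ≤ j ∧
        (docs.drop (j + 1).toNat).filter (fun d => alldocs.contains d) = xs := by
    intro n
    induction n with
    | zero =>
      intro s h0 hn h
      have : docs.drop s.toNat = [] := List.drop_eq_nil_of_le (by omega)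
      rw [this] at h; simp at h
    | succ n ih =>
      intro s h0 hn h
      by_cases hlt : s < (docs.length : Int)
      · have hsn : s.toNat < docs.length := by omega
        rw [List.drop_eq_getElem_cons hsn, List.filter_cons] at h
        cases hc : alldocs.contains docs[s.toNat] with
        | true =>
          rw [hc] at h
          simp only [if_true] at h
          obtain ⟨hx, hxs⟩ : docs[s.toNat] = x ∧
              (docs.drop (s.toNat + 1)).filter (fun d => alldocs.contains d) = xs := by
            exact ⟨(List.cons.injEq _ _ _ _ ▸ h).1, (List.cons.injEq _ _ _ _ ▸ h).2⟩
          refine ⟨s, ?_, h0, ?_⟩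
          · rw [scanA.eq_def]
            simp only [hlt, dif_pos, PySem.List.pyGet?_eq_some_getElem docs h0 hlt, hx]
            rw [if_pos (hx ▸ hc)]
          · have : (s + 1).toNat = s.toNat + 1 := by omega
            rw [this]; exact hxs
        | false =>
          rw [hc] at h
          simp only [Bool.false_eq_true, if_false] at h
          obtain ⟨j, hj1, hj2, hj3⟩ := ih (s + 1) (by omega) (by omega)
            (by have : (s + 1).toNat = s.toNat + 1 := by omega
                rw [this]; exact h)
          refine ⟨j, ?_, hj2, hj3⟩
          rw [scanA.eq_def]
          simp only [hlt, dif_pos, PySem.List.pyGet?_eq_some_getElem docs h0 hlt, hc,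
            Bool.false_eq_true, if_false]
          exact hj1
      · have : docs.drop s.toNat = [] := List.drop_eq_nil_of_le (by omega)
        rw [this] at h; simp at h
  exact main (docs.length - start.toNat + 1) start h0 (by omega) h

theorem aLoop_eq (labeled : PySem.Dict Int (List String)) (alldocs : List String)
    (grads : List Int) (testnum : Int) (hnd : grads.Nodup) (hne : grads ≠ []) :
    ∀ (fuel : Nat) (i : Int) (lidx : PySem.Dict Int Int) (acc : List String),
      0 ≤ i → (∀ g, 0 ≤ lidx.getD g 0) →
      (testnum - acc.length : Int) ≤
        (sumLens (qOf alldocs labeled grads lidx ((PySem.Int.mod i (grads.length : Int)).toNat)) : Int) →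
      (testnum - acc.length).toNat * grads.length
          + (qOf alldocs labeled grads lidx ((PySem.Int.mod i (grads.length : Int)).toNat)).findIdx
              (fun l => !l.isEmpty) + 1 ≤ fuel →
      aLoop labeled alldocs grads testnum fuel i lidx acc
        = mLoop testnum acc (qOf alldocs labeled grads lidx ((PySem.Int.mod i (grads.length : Int)).toNat)) := by
  intro fuel
  induction fuel with
  | zero => intro i lidx acc _ _ _ hfuel; omega
  | succ f ih =>
    intro i lidx acc hi hnn hav hfuel
    have hm : 0 < grads.length := by
      cases grads with
      | nil => exact absurd rfl hne
      | cons a t => simp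
    by_cases hlt : ((acc.length : Int) < testnum)
    case neg =>
      rw [aLoop_of_ge _ _ _ _ _ _ _ _ hlt, mLoop_of_ge _ _ _ hlt]
    case pos =>
      have hmz : ((grads.length : Int)) ≠ 0 := by exact_mod_cast hm.ne'
      have hmodnn : 0 ≤ PySem.Int.mod i (grads.length : Int) :=
        PySem.Int.mod_nonneg i (by exact_mod_cast hm)
      have hmodlt : PySem.Int.mod i (grads.length : Int) < (grads.length : Int) :=
        PySem.Int.mod_lt i (by exact_mod_cast hm)
      set r : Nat := (PySem.Int.mod i (grads.length : Int)).toNat with hrdef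
      have hrlt : r < grads.length := by omega
      set l : Int := grads[r]'hrlt with hldef
      have hmodsome : PySem.Int.mod? i (grads.length : Int)
          = some (PySem.Int.mod i (grads.length : Int)) := by
        simp [PySem.Int.mod?, PySem.Int.mod, hmz, hne]
      have hget : PySem.List.pyGetD grads (PySem.Int.mod i (grads.length : Int)) 0 = l :=
        PySem.List.pyGetD_eq_getElem grads 0 hmodnn hmodlt
      set docs : List String := (labeled.get? l).getD [] with hdocs
      set cur : Int := lidx.getD l 0 with hcur
      have hcur0 : 0 ≤ cur := hnn l
      have hlhs : aLoop labeled alldocs grads testnum (f + 1) i lidx acc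
          = (match scanA alldocs docs cur with
             | none => aLoop labeled alldocs grads testnum f (i + 1) lidx acc
             | some (j, d) =>
                 aLoop labeled alldocs grads testnum f (i + 1) (lidx.insert l (j + 1)) (acc ++ [d])) := by
        rw [aLoop.eq_def]
        simp only [if_pos hlt, hmodsome, hget]
        rfl
      set tailq : List (List String) :=
        (grads.drop (r + 1) ++ grads.take r).map (remOf alldocs labeled lidx) with htq
      have hqdef : qOf alldocs labeled grads lidx r = remOf alldocs labeled lidx l :: tailq := by
        unfold qOf
        rw [List.drop_eq_getElem_cons hrlt, List.cons_append, List.map_cons, ← htq, ← hldef]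
      have hltail : tailq.length = grads.length - 1 := by
        simp [htq]; omega
      have hrot : grads.drop ((r + 1) % grads.length) ++ grads.take ((r + 1) % grads.length)
          = (grads.drop (r + 1) ++ grads.take r) ++ [l] := by
        have htk : grads.take (r + 1) = grads.take r ++ [l] := by
          rw [hldef, List.take_add_one, List.getElem?_eq_getElem hrlt]
          rfl
        by_cases hcase : r + 1 = grads.length
        · rw [hcase, Nat.mod_self]
          simp only [List.drop_zero, List.take_zero, List.append_nil]
          rw [List.drop_length, List.nil_append, ← htk, hcase, List.take_length]
        · rw [Nat.mod_eq_of_lt (by omega), htk]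
          simp
      have hmod1 : (PySem.Int.mod (i + 1) (grads.length : Int)).toNat = (r + 1) % grads.length := by
        have h1 : PySem.Int.mod ((i.toNat : Int) + 1) (grads.length : Int)
            = (((i.toNat + 1) % grads.length : Nat) : Int) := by
          rw [show ((i.toNat : Int) + 1) = ((i.toNat + 1 : Nat) : Int) by push_cast; ring]
          exact PySem.Int.mod_natCast _ _
        have h3 : r = i.toNat % grads.length := by
          have hmc := PySem.Int.mod_natCast i.toNat grads.length
          rw [hrdef, show (i : Int) = ((i.toNat : Nat) : Int) by omega, hmc,
            Int.toNat_natCast, Int.toNat_natCast]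
        rw [show (i + 1 : Int) = ((i.toNat : Int) + 1) by omega, h1, h3]
        rw [Int.toNat_natCast]
        conv_rhs => rw [Nat.add_mod, Nat.mod_mod_of_dvd _ dvd_rfl]
        rw [Nat.add_mod]
      have hlnotin : l ∉ grads.drop (r + 1) ++ grads.take r := by
        have hsplit : grads = grads.take r ++ l :: grads.drop (r + 1) := by
          conv_lhs => rw [← List.take_append_drop r grads]
          rw [List.drop_eq_getElem_cons hrlt]
        have hnodup := hnd
        rw [hsplit, List.nodup_append] at hnodup
        obtain ⟨-, hn2, hdisj⟩ := hnodup
        intro hmem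
        rcases List.mem_append.1 hmem with h1 | h2
        · exact (List.nodup_cons.1 hn2).1 h1
        · exact hdisj l h2 l List.mem_cons_self rfl
      have hrem_eq : remOf alldocs labeled lidx l
          = (docs.drop cur.toNat).filter (fun d => alldocs.contains d) := rfl
      cases hrem : (docs.drop cur.toNat).filter (fun d => alldocs.contains d) with
      | nil =>
        rw [hlhs, scanA_none alldocs docs cur hcur0 hrem]
        show aLoop labeled alldocs grads testnum f (i + 1) lidx acc
          = mLoop testnum acc (qOf alldocs labeled grads lidx r)
        have hremnil : remOf alldocs labeled lidx l = [] := by rw [hrem_eq, hrem]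
        have hsum_eq : sumLens (qOf alldocs labeled grads lidx r) = sumLens tailq := by
          rw [hqdef, hremnil]; simp [sumLens]
        have hneed : 0 < testnum - (acc.length : Int) := by omega
        have hex : ∃ y ∈ tailq, (!List.isEmpty y) = true := by
          by_contra hno
          push_neg at hno
          have hall : ∀ y ∈ tailq, y = [] := by
            intro y hy
            have := hno y hy
            simpa using this
          have : sumLens tailq = 0 := by
            unfold sumLens
            rw [List.sum_eq_zero]
            intro z hz
            simp only [List.mem_map] at hz
            obtain ⟨y, hy, rfl⟩ := hz
            rw [hall y hy]; rfl
          rw [hsum_eq, this] at hav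
          omega
        have hq' : qOf alldocs labeled grads lidx ((PySem.Int.mod (i + 1) (grads.length : Int)).toNat)
            = tailq ++ [[]] := by
          rw [hmod1]
          unfold qOf
          rw [hrot, List.map_append]
          simp [htq, hremnil]
        have hfi : (qOf alldocs labeled grads lidx r).findIdx (fun l : List String => !l.isEmpty)
            = tailq.findIdx (fun l : List String => !l.isEmpty) + 1 := by
          rw [hqdef, hremnil, List.findIdx_cons]
          rfl
        have hfi' : (tailq ++ [[]]).findIdx (fun l : List String => !l.isEmpty)
            = tailq.findIdx (fun l : List String => !l.isEmpty) := by
          rw [List.findIdx_append, if_pos (List.findIdx_lt_length_of_exists hex)]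
        have hih := ih (i + 1) lidx acc (by omega) hnn
          (by rw [hq']
              have hs2 : sumLens (tailq ++ [[]]) = sumLens tailq := by unfold sumLens; simp
              rw [hs2, ← hsum_eq]
              exact hav)
          (by rw [hq', hfi']; rw [hfi] at hfuel; omega)
        rw [hih, hq']
        have : tailq ++ [[]] = tailq ++ [] :: [] := rfl
        rw [this, mLoop_mid_nil testnum (((tailq ++ []).map (fun y : List String => y.length + 1)).sum) tailq [] acc le_rfl]
        rw [List.append_nil, hqdef, hremnil, mLoop_nil_head]
      | cons x xs =>
        obtain ⟨j, hj1, hj2, hj3⟩ := scanA_some alldocs docs cur x xs hcur0 hrem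
        rw [hlhs, hj1]
        show aLoop labeled alldocs grads testnum f (i + 1) (lidx.insert l (j + 1)) (acc ++ [x])
          = mLoop testnum acc (qOf alldocs labeled grads lidx r)
        have hremcons : remOf alldocs labeled lidx l = x :: xs := by rw [hrem_eq, hrem]
        have hstep : mLoop testnum acc ((x :: xs) :: tailq)
            = mLoop testnum (acc ++ [x]) (tailq ++ [xs]) := by
          rw [mLoop.eq_def]; simp [hlt]
        have hmapeq : (grads.drop (r + 1) ++ grads.take r).map
            (remOf alldocs labeled (lidx.insert l (j + 1))) = tailq := by
          rw [htq]
          apply List.map_congr_left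
          intro g hg
          have hgl : g ≠ l := fun he => hlnotin (he ▸ hg)
          unfold remOf
          rw [PySem.Dict.getD_insert, if_neg hgl]
        have hreml' : remOf alldocs labeled (lidx.insert l (j + 1)) l = xs := by
          unfold remOf
          rw [PySem.Dict.getD_insert, if_pos rfl]
          exact hj3
        have hq' : qOf alldocs labeled grads (lidx.insert l (j + 1))
              ((PySem.Int.mod (i + 1) (grads.length : Int)).toNat)
            = tailq ++ [xs] := by
          rw [hmod1]
          unfold qOf
          rw [hrot, List.map_append, hmapeq]
          simp [hreml']
        have hnn' : ∀ g, 0 ≤ (lidx.insert l (j + 1)).getD g 0 := by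
          intro g
          rw [PySem.Dict.getD_insert]
          split
          · omega
          · exact hnn g
        have hsums : sumLens (qOf alldocs labeled grads lidx r)
            = sumLens tailq + xs.length + 1 := by
          rw [hqdef, hremcons]
          unfold sumLens
          simp; omega
        by_cases hdone : ((acc.length : Int) + 1 < testnum)
        · have hex' : ∃ y ∈ tailq ++ [xs], (!List.isEmpty y) = true := by
            by_contra hno
            push_neg at hno
            have hall : ∀ y ∈ tailq ++ [xs], y = [] := by
              intro y hy
              have := hno y hy
              simpa using this
            have hz : sumLens (tailq ++ [xs]) = 0 := by
              unfold sumLens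
              rw [List.sum_eq_zero]
              intro z hz
              simp only [List.mem_map] at hz
              obtain ⟨y, hy, rfl⟩ := hz
              rw [hall y hy]; rfl
            have : sumLens (tailq ++ [xs]) = sumLens tailq + xs.length := by
              unfold sumLens; simp
            omega
          have hfi' : (tailq ++ [xs]).findIdx (fun l : List String => !l.isEmpty) < grads.length := by
            have := List.findIdx_lt_length_of_exists hex'
            simp only [List.length_append, List.length_cons, List.length_nil] at this
            omega
          have hih := ih (i + 1) (lidx.insert l (j + 1)) (acc ++ [x]) (by omega) hnn'
            (by have hs2 : sumLens (tailq ++ [xs]) = sumLens tailq + xs.length := by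
                  unfold sumLens; simp
                have hlen : (acc ++ [x]).length = acc.length + 1 := by simp
                rw [hsums] at hav
                rw [hq', hs2, hlen]
                push_cast at hav ⊢
                omega)
            (by rw [hq']
                have hlen : (acc ++ [x]).length = acc.length + 1 := by simp
                rw [hlen]
                have hmul : (testnum - ((acc.length : Int))).toNat * grads.length
                    = (testnum - ((acc.length : Int) + 1)).toNat * grads.length + grads.length := by
                  have h1 : (testnum - ((acc.length : Int))).toNat
                      = (testnum - ((acc.length : Int) + 1)).toNat + 1 := by omega
                  rw [h1]; ring
                push_cast
                omega)
          rw [hih, hq', hqdef, hremcons, hstep]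
        · have hf1 : 1 ≤ f := by
            have hp0 : 0 ≤ (qOf alldocs labeled grads lidx r).findIdx (fun l : List String => !l.isEmpty) := Nat.zero_le _
            have : 1 ≤ (testnum - (acc.length : Int)).toNat := by omega
            calc 1 ≤ (testnum - (acc.length : Int)).toNat * grads.length := by
                  calc 1 = 1 * 1 := rfl
                  _ ≤ (testnum - (acc.length : Int)).toNat * grads.length :=
                    Nat.mul_le_mul this hm
            _ ≤ f := by omega
          have hge : ¬ (((acc ++ [x]).length : Int) < testnum) := by
            simp only [List.length_append, List.length_cons, List.length_nil]
            push_cast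
            omega
          rw [aLoop_of_ge _ _ _ _ _ _ _ _ hge, hqdef, hremcons, hstep,
            mLoop_of_ge _ _ _ hge]

theorem getD_foldl_const (xs : List Int) (g : Int) (d : PySem.Dict Int Int) (h : d.getD g 0 = 0) :
    ((xs.map (fun k => (k, (0 : Int)))).foldl (fun d p => d.insert p.1 p.2) d).getD g 0 = 0 := by
  induction xs generalizing d with
  | nil => simpa using h
  | cons x t ih =>
    simp only [List.map_cons, List.foldl_cons]
    exact ih _ (by rw [PySem.Dict.getD_insert]; split <;> simp [h])

theorem contains_ofList_eq (xs : List String) (d : String) :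
    (PySem.Set.ofList xs).contains d = xs.contains d := by
  by_cases h : d ∈ xs
  · simp [PySem.Set.mem_ofList, h]
  · simp [PySem.Set.mem_ofList, h]

-- ===== VERDICT (by name: the statement is the Claim_ definition above) =====
theorem createTestDoc_spec : Claim_equal_createTestDoc := by
  unfold Claim_equal_createTestDoc
  intro ldocs alldocs testnum _ hpre
  unfold Spec_createTestDoc
  by_cases htn : testnum ≤ 0
  · have hA : createTestDoc ldocs alldocs testnum = [] :=
      aLoop_of_ge _ _ _ _ _ _ _ _ (by simp; omega)
    have hB : createTestDoc_alt ldocs alldocs testnum = [] :=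
      bLoopP_of_ge _ _ _ (by simp; omega)
    rw [hA, hB]
  · push_neg at htn
    rcases hpre with h | ⟨hkne, hcnt⟩
    · omega
    have hnd : (PySem.Dict.ofList ldocs).keys.Nodup := PySem.Dict.nodup_keys_ofList ldocs
    have hm : 0 < (PySem.Dict.ofList ldocs).keys.length := by
      cases hk : (PySem.Dict.ofList ldocs).keys with
      | nil => exact absurd hk hkne
      | cons a t => simp
    have hlidx0 : ∀ g, (PySem.Dict.ofList
        ((PySem.Dict.ofList ldocs).keys.map (fun g => (g, (0 : Int))))).getD g 0 = 0 := by
      intro g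
      exact getD_foldl_const (PySem.Dict.ofList ldocs).keys g PySem.Dict.empty
        (PySem.Dict.getD_empty g 0)
    have hr0 : (PySem.Int.mod (((PySem.Dict.ofList ldocs).keys.length : Int) - 1)
        ((PySem.Dict.ofList ldocs).keys.length : Int)).toNat
        = (PySem.Dict.ofList ldocs).keys.length - 1 := by
      rw [show (((PySem.Dict.ofList ldocs).keys.length : Int) - 1)
          = (((PySem.Dict.ofList ldocs).keys.length - 1 : Nat) : Int) by omega,
        PySem.Int.mod_natCast, Nat.mod_eq_of_lt (by omega), Int.toNat_natCast]
    have hrem0 : ∀ g, remOf alldocs (PySem.Dict.ofList ldocs)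
        (PySem.Dict.ofList ((PySem.Dict.ofList ldocs).keys.map (fun g => (g, (0 : Int))))) g
        = (((PySem.Dict.ofList ldocs).get? g).getD []).filter
            (fun d => alldocs.contains d) := by
      intro g
      unfold remOf
      rw [hlidx0 g]
      simp
    have hsum0 : sumLens (qOf alldocs (PySem.Dict.ofList ldocs) (PySem.Dict.ofList ldocs).keys
          (PySem.Dict.ofList ((PySem.Dict.ofList ldocs).keys.map (fun g => (g, (0 : Int)))))
          ((PySem.Dict.ofList ldocs).keys.length - 1))
        = (((PySem.Dict.ofList ldocs).keys.map (fun g =>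
            ((((PySem.Dict.ofList ldocs).get? g).getD []).filter
              (fun d => alldocs.contains d)).length)).sum) := by
      unfold qOf sumLens
      rw [List.map_map]
      have hfg : ((PySem.Dict.ofList ldocs).keys.drop ((PySem.Dict.ofList ldocs).keys.length - 1)
            ++ (PySem.Dict.ofList ldocs).keys.take ((PySem.Dict.ofList ldocs).keys.length - 1)).map
            (List.length ∘ remOf alldocs (PySem.Dict.ofList ldocs)
              (PySem.Dict.ofList ((PySem.Dict.ofList ldocs).keys.map (fun g => (g, (0 : Int))))))
          = ((PySem.Dict.ofList ldocs).keys.drop ((PySem.Dict.ofList ldocs).keys.length - 1)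
            ++ (PySem.Dict.ofList ldocs).keys.take ((PySem.Dict.ofList ldocs).keys.length - 1)).map
            (fun g => ((((PySem.Dict.ofList ldocs).get? g).getD []).filter
              (fun d => alldocs.contains d)).length) := by
        apply List.map_congr_left
        intro g _
        simp only [Function.comp_apply, hrem0 g]
      rw [hfg, List.map_append, List.sum_append]
      conv_rhs => rw [← List.take_append_drop ((PySem.Dict.ofList ldocs).keys.length - 1)
        (PySem.Dict.ofList ldocs).keys]
      rw [List.map_append, List.sum_append]
      omega
    have key := aLoop_eq (PySem.Dict.ofList ldocs) alldocs (PySem.Dict.ofList ldocs).keys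
      testnum hnd hkne
      (testnum.toNat * (PySem.Dict.ofList ldocs).keys.length
        + (PySem.Dict.ofList ldocs).keys.length + 1)
      (((PySem.Dict.ofList ldocs).keys.length : Int) - 1)
      (PySem.Dict.ofList ((PySem.Dict.ofList ldocs).keys.map (fun g => (g, (0 : Int))))) []
      (by omega)
      (fun g => by rw [hlidx0 g])
      (by rw [hr0, hsum0]; simpa using hcnt)
      (by rw [hr0]
          have hle : ((qOf alldocs (PySem.Dict.ofList ldocs) (PySem.Dict.ofList ldocs).keys
              (PySem.Dict.ofList ((PySem.Dict.ofList ldocs).keys.map (fun g => (g, (0 : Int)))))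
              ((PySem.Dict.ofList ldocs).keys.length - 1)).findIdx (fun l => !l.isEmpty))
              ≤ (PySem.Dict.ofList ldocs).keys.length := by
            have h1 := @List.findIdx_le_length _ (fun l : List String => !l.isEmpty)
              (qOf alldocs (PySem.Dict.ofList ldocs) (PySem.Dict.ofList ldocs).keys
                (PySem.Dict.ofList ((PySem.Dict.ofList ldocs).keys.map (fun g => (g, (0 : Int)))))
                ((PySem.Dict.ofList ldocs).keys.length - 1))
            have h2 : (qOf alldocs (PySem.Dict.ofList ldocs) (PySem.Dict.ofList ldocs).keys
                (PySem.Dict.ofList ((PySem.Dict.ofList ldocs).keys.map (fun g => (g, (0 : Int)))))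
                ((PySem.Dict.ofList ldocs).keys.length - 1)).length
                = (PySem.Dict.ofList ldocs).keys.length := by
              unfold qOf
              simp
            omega
          have hne0 : ((0 : Int)) ≤ testnum := by omega
          have : (testnum - ((([] : List String).length : Int))).toNat = testnum.toNat := by
            simp
          rw [this]
          omega)
    rw [hr0] at key
    have hA : createTestDoc ldocs alldocs testnum
        = aLoop (PySem.Dict.ofList ldocs) alldocs (PySem.Dict.ofList ldocs).keys testnum
          (testnum.toNat * (PySem.Dict.ofList ldocs).keys.length
            + (PySem.Dict.ofList ldocs).keys.length + 1)
          (((PySem.Dict.ofList ldocs).keys.length : Int) - 1)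
          (PySem.Dict.ofList ((PySem.Dict.ofList ldocs).keys.map (fun g => (g, (0 : Int))))) [] := rfl
    have hqinit : qOf alldocs (PySem.Dict.ofList ldocs) (PySem.Dict.ofList ldocs).keys
          (PySem.Dict.ofList ((PySem.Dict.ofList ldocs).keys.map (fun g => (g, (0 : Int)))))
          ((PySem.Dict.ofList ldocs).keys.length - 1)
        = (PySem.List.slice (PySem.Dict.ofList ldocs).keys (some (-1)) none
            ++ PySem.List.slice (PySem.Dict.ofList ldocs).keys none (some (-1))).map
            (fun g => (((PySem.Dict.ofList ldocs).get? g).getD []).filter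
              (fun d => PySem.Set.contains (PySem.Set.ofList alldocs) d)) := by
      unfold qOf
      rw [PySem.List.slice_from_neg_one, PySem.List.slice_to_neg_one, List.dropLast_eq_take]
      apply List.map_congr_left
      intro g _
      rw [hrem0 g]
      apply List.filter_congr
      intro d _
      rw [contains_ofList_eq]
    have hB : createTestDoc_alt ldocs alldocs testnum
        = bLoop testnum []
            ((PySem.List.slice (PySem.Dict.ofList ldocs).keys (some (-1)) none
              ++ PySem.List.slice (PySem.Dict.ofList ldocs).keys none (some (-1))).map
              (fun g => ((((PySem.Dict.ofList ldocs).get? g).getD []).filter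
                (fun d => PySem.Set.contains (PySem.Set.ofList alldocs) d), (0 : Int)))) := rfl
    have hq0inv : ∀ p ∈ ((PySem.List.slice (PySem.Dict.ofList ldocs).keys (some (-1)) none
          ++ PySem.List.slice (PySem.Dict.ofList ldocs).keys none (some (-1))).map
          (fun g => ((((PySem.Dict.ofList ldocs).get? g).getD []).filter
            (fun d => PySem.Set.contains (PySem.Set.ofList alldocs) d), (0 : Int)))), 0 ≤ p.2 := by
      intro p hp
      obtain ⟨g, -, rfl⟩ := List.mem_map.1 hp
      exact le_refl 0
    have habs := bLoop_abs testnum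
      ((((PySem.List.slice (PySem.Dict.ofList ldocs).keys (some (-1)) none
          ++ PySem.List.slice (PySem.Dict.ofList ldocs).keys none (some (-1))).map
          (fun g => ((((PySem.Dict.ofList ldocs).get? g).getD []).filter
            (fun d => PySem.Set.contains (PySem.Set.ofList alldocs) d), (0 : Int)))).map
          (fun p => ((p.1.length : Int) - p.2).toNat + 1)).sum)
      ((PySem.List.slice (PySem.Dict.ofList ldocs).keys (some (-1)) none
          ++ PySem.List.slice (PySem.Dict.ofList ldocs).keys none (some (-1))).map
          (fun g => ((((PySem.Dict.ofList ldocs).get? g).getD []).filter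
            (fun d => PySem.Set.contains (PySem.Set.ofList alldocs) d), (0 : Int))))
      [] hq0inv le_rfl
    rw [hA, key, hqinit, hB, habs, List.map_map]
    congr 1
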